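-- pv_equiv track=rewrite | github.com/deepak01-Hacker/CodingisEasy | Sum_of_length_Non_overlaping_subarray.py | sumOverlapingLength
-- ===== SOURCE A (Python) =====
-- def sumOverlapingLength(arr,k):
--     Sum_ans = 0
--     count = 0
--     flag = False
--     for index in range(len(arr)):
--         if arr[index] == k:
--             flag = True
--         if arr[index] < k+1:
--             count += arr[index]
--         else:
--             if flag:
--                 Sum_ans += count
--                 flag = False
--             count = 0
--     if flag:
--         Sum_ans += count
--     return Sum_ans
-- ===== SOURCE B (Python) =====
-- def sumOverlapingLength(arr, k):
--     # Phase 1: split arr into segments delimited by elements >= k+1 (delimiters dropped).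
--     segments = []
--     cur = []
--     for x in arr:
--         if x >= k + 1:
--             segments.append(cur)
--             cur = []
--         else:
--             cur.append(x)
--     segments.append(cur)
--     # Phase 2: total the sums of segments that contain k.
--     total = 0
--     for seg in segments:
--         if k in seg:
--             total += sum(seg)
--     return total
-- ===== Notes on version B (the rewrite author's own statement) =====
-- stated objective: alternative
-- what changed: Replaces A's single stateful scan (running count + flag with end-of-loop flush) by a two-phase group-then-reduce: first split arr into segments delimited by elements >= k+1, then add sum(seg) for every segment containing k.
import Mathlib
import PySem

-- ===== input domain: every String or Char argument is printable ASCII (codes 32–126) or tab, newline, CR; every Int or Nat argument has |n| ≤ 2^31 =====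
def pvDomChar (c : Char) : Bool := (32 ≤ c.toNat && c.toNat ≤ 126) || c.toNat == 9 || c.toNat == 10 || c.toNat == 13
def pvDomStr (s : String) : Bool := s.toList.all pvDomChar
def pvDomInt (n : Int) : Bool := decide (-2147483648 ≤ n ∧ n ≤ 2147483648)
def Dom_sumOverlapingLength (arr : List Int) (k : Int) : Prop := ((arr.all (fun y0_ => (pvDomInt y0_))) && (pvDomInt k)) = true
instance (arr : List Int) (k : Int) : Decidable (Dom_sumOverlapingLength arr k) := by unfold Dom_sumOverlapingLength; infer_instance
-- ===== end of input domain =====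

-- B replaces A's one-pass stateful scan (running count + flag, flushed at delimiters and once
-- at the end) by an explicit group-then-reduce decomposition; objective: alternative (same cost).

-- ===== PORT A =====
-- A's loop body on state (Sum_ans, count, flag) and the current element arr[index].
def pvStepA (k : Int) (st : Int × Int × Bool) (x : Int) : Int × Int × Bool :=
  let flag := if x == k then true else st.2.2
  if x < k + 1 then (st.1, st.2.1 + x, flag)
  else if flag then (st.1 + st.2.1, 0, false)
  else (st.1, 0, flag)

-- A's code after the loop: 'if flag: Sum_ans += count; return Sum_ans'.
def pvFinishA (st : Int × Int × Bool) : Int :=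
  if st.2.2 then st.1 + st.2.1 else st.1

def sumOverlapingLength (arr : List Int) (k : Int) : Int :=
  pvFinishA
    ((PySem.List.pyRange 0 arr.length 1).foldl
      (fun st index => pvStepA k st (PySem.List.pyGetD arr index 0))
      (0, 0, false))

-- ===== PORT B =====
-- Source B phase 1 loop body on state (segments, cur).
def pvStepB (k : Int) (p : List (List Int) × List Int) (x : Int) : List (List Int) × List Int :=
  if x ≥ k + 1 then (p.1 ++ [p.2], []) else (p.1, p.2 ++ [x])

def sumOverlapingLength_alt (arr : List Int) (k : Int) : Int :=
  let p := arr.foldl (pvStepB k) ([], [])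
  let segments := p.1 ++ [p.2]
  -- phase 2 of Source B: total the sums of the segments that contain k.
  segments.foldl (fun total seg => if seg.contains k then total + seg.sum else total) 0

-- ===== PRECONDITION & SPEC =====
def Spec_sumOverlapingLength (arr : List Int) (k : Int) (out : Int) : Prop := out = sumOverlapingLength_alt arr k
instance (arr : List Int) (k : Int) (out : Int) : Decidable (Spec_sumOverlapingLength arr k out) := by unfold Spec_sumOverlapingLength; infer_instance

-- ===== CLAIM (what is proved, stated in full; the proofs are below) =====
def Claim_equal_sumOverlapingLength : Prop := ∀ (arr : List Int) (k : Int), Dom_sumOverlapingLength arr k → Spec_sumOverlapingLength arr k (sumOverlapingLength arr k)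

-- ===== LEMMAS AND PROOFS =====

-- The tally of a list of segments: B's phase-2 fold, in closed form.
def pvTally (k : Int) (segs : List (List Int)) : Int :=
  ((segs.filter (fun seg => seg.contains k)).map List.sum).sum

theorem pvPhase2_eq_tally (k : Int) (segs : List (List Int)) (a : Int) :
    segs.foldl (fun total seg => if seg.contains k then total + seg.sum else total) a
      = a + pvTally k segs := by
  induction segs generalizing a with
  | nil => simp [pvTally]
  | cons s rest ih =>
    rw [List.foldl_cons, ih]
    by_cases h : k ∈ s
    · simp [pvTally, h]; ring
    · simp [pvTally, h]

-- The segment accumulator of B's phase 1 is append-only.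
theorem pvSplit_accum (k : Int) (arr : List Int) (segs : List (List Int)) (cur : List Int) :
    arr.foldl (pvStepB k) (segs, cur)
      = (segs ++ (arr.foldl (pvStepB k) ([], cur)).1, (arr.foldl (pvStepB k) ([], cur)).2) := by
  induction arr generalizing segs cur with
  | nil => simp
  | cons x rest ih =>
    by_cases h : x ≥ k + 1
    · simp only [List.foldl_cons, pvStepB, if_pos h, List.nil_append]
      rw [ih (segs ++ [cur]) [], ih [cur] []]
      simp
    · simp only [List.foldl_cons, pvStepB, if_neg h]
      exact ih segs (cur ++ [x])

-- Main invariant: A's scan started in the state summarising a pending segment `cur`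
-- equals S plus B's tally of the segments the rest of the input produces from `cur`.
theorem pvMain (k : Int) (arr : List Int) (S : Int) (cur : List Int) :
    pvFinishA (arr.foldl (pvStepA k) (S, cur.sum, cur.contains k))
      = S + pvTally k ((arr.foldl (pvStepB k) ([], cur)).1
                        ++ [(arr.foldl (pvStepB k) ([], cur)).2]) := by
  induction arr generalizing S cur with
  | nil =>
    simp only [List.foldl_nil, pvFinishA, pvTally]
    by_cases h : k ∈ cur <;> simp [h]
  | cons x rest ih =>
    by_cases hx : x < k + 1
    · have hge : ¬ (x ≥ k + 1) := by omega
      have hstep : pvStepA k (S, cur.sum, cur.contains k) x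
          = (S, (cur ++ [x]).sum, (cur ++ [x]).contains k) := by
        have hflag : (decide (x = k) || decide (k ∈ cur)) = decide (k ∈ cur ++ [x]) := by
          by_cases he : x = k
          · simp [he]
          · have hne' : ¬ k = x := fun h => he h.symm
            simp [he, hne']
        simp [pvStepA, hx, hflag]
      simp only [List.foldl_cons, pvStepB, if_neg hge, hstep]
      exact ih S (cur ++ [x])
    · have hge : x ≥ k + 1 := by omega
      have hne : (x == k) = false := by simp; omega
      have hstep : pvStepA k (S, cur.sum, cur.contains k) x
          = ((if cur.contains k then S + cur.sum else S), ([] : List Int).sum,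
             ([] : List Int).contains k) := by
        by_cases hf : k ∈ cur <;> simp [pvStepA, hx, hne, hf]
      simp only [List.foldl_cons, pvStepB, if_pos hge, hstep, List.nil_append]
      rw [ih (if cur.contains k then S + cur.sum else S) [], pvSplit_accum k rest [cur] []]
      simp only [List.cons_append, List.nil_append, pvTally, List.filter_cons]
      by_cases hf : k ∈ cur
      · simp [hf]; ring
      · simp [hf]

-- ===== VERDICT (by name: the statement is the Claim_ definition above) =====
theorem sumOverlapingLength_spec : Claim_equal_sumOverlapingLength := by
  intro arr k _
  unfold Spec_sumOverlapingLength sumOverlapingLength sumOverlapingLength_alt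
  rw [PySem.List.foldl_pyRange_zero_pyGetD' arr 0 (pvStepA k) (0, 0, false)]
  rw [pvPhase2_eq_tally]
  simpa using pvMain k arr 0 []
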